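-- pv_equiv track=rewrite | github.com/seojihwan/algorithm | Python/BOJ/bfs/14502.py | serachAll
-- ===== SOURCE A (Python) =====
-- from copy import deepcopy
-- from itertools import combinations
--
-- def serachAll(arr, n, m):
--     temp = 0
--     stack = []
--     virusStack = []
--     for y in range(n):
--         for x in range(m):
--             if not arr[y][x]:
--                 stack.append([y, x])
--             if arr[y][x] == 2:
--                 virusStack.append([y, x])
--     stackCombination = list(combinations(stack, 3))
--     for el in stackCombination:
--         e = list(el)
--         arr[e[0][0]][e[0][1]] = 1
--         arr[e[1][0]][e[1][1]] = 1
--         arr[e[2][0]][e[2][1]] = 1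
--         arr2 = deepcopy(arr)
--         for ve in virusStack:
--             virus(arr2, ve, n, m)
--         temp = max(temp, check(arr2))
--
--         arr[e[0][0]][e[0][1]] = 0
--         arr[e[1][0]][e[1][1]] = 0
--         arr[e[2][0]][e[2][1]] = 0
--     return temp
--
-- tmp = [[-1, 0], [0, 1], [1, 0], [0, -1]]
--
-- def virus(arr, vrs, n, m):
--     y = vrs[0]
--     x = vrs[1]
--     for i in range(4):
--         ay = y + tmp[i][0]
--         ax = x + tmp[i][1]
--
--         if 0 <= ay < n and 0 <= ax < m:
--             if not arr[ay][ax]: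
--                 arr[ay][ax] = 2
--                 virus(arr, [ay, ax], n, m)
--
-- def check(arr):
--     cnt = 0
--     for e in arr:
--         for el in e:
--             if not el:
--                 cnt += 1
--     return cnt
-- ===== SOURCE B (Python) =====
-- from itertools import combinations
--
-- def serachAll(arr, n, m):
--     empties = [(y, x) for y in range(n) for x in range(m) if arr[y][x] == 0]
--     viruses = [(y, x) for y in range(n) for x in range(m) if arr[y][x] == 2]
--     best = 0
--     for walls in combinations(empties, 3):
--         grid = [row[:] for row in arr]
--         for y, x in walls:
--             grid[y][x] = 1
--         stack = list(viruses)
--         while stack: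
--             y, x = stack.pop()
--             for dy, dx in ((-1, 0), (0, 1), (1, 0), (0, -1)):
--                 ay, ax = y + dy, x + dx
--                 if 0 <= ay < n and 0 <= ax < m and grid[ay][ax] == 0:
--                     grid[ay][ax] = 2
--                     stack.append((ay, ax))
--         best = max(best, sum(row.count(0) for row in grid))
--     return best
-- ===== Notes on version B (the rewrite author's own statement) =====
-- stated objective: alternative
-- what changed: The recursive per-virus DFS with mutate-then-restore wall placement is replaced by a single iterative worklist flood fill seeded with all viruses at once over a fresh per-combination copy, with the scan done by comprehensions and the safe-cell count by row.count(0).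
import Mathlib
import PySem

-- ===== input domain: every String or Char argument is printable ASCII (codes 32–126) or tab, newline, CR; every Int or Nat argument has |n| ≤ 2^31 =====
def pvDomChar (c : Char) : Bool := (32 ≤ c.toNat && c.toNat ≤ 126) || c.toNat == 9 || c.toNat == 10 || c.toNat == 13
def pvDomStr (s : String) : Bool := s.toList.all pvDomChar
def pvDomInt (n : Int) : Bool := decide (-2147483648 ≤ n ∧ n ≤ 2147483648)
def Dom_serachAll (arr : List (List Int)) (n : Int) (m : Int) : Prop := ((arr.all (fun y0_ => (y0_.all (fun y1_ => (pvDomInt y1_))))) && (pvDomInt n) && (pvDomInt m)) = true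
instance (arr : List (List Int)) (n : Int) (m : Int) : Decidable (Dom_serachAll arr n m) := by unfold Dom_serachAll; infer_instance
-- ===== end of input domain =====

-- B replaces A's recursive per-virus DFS (walls placed in arr and restored) by a single
-- iterative worklist flood fill over a fresh per-combination copy, seeded with all viruses
-- at once; equivalence is about the return value (A temporarily mutates arr but restores it).

-- ===== PORT A =====
-- shared primitive accessors: arr[y][x] read / write at indices the guards keep in range
def valAt (g : List (List Int)) (y x : Int) : Int := (g.getD y.toNat []).getD x.toNat 0

def setAt (g : List (List Int)) (y x : Int) (v : Int) : List (List Int) :=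
  g.modify y.toNat (fun row => row.set x.toNat v)

-- tmp = [[-1,0],[0,1],[1,0],[0,-1]]
def dirsA : List (Int × Int) := [(-1, 0), (0, 1), (1, 0), (0, -1)]

-- itertools.combinations(l, 3) in its enumeration order (used by both Pythons)
def combos2 {α : Type} (l : List α) : List (α × α) :=
  match l with
  | [] => []
  | a :: t => t.map (fun b => (a, b)) ++ combos2 t

def combos3 {α : Type} (l : List α) : List (α × α × α) :=
  match l with
  | [] => []
  | a :: t => (combos2 t).map (fun p => (a, p.1, p.2)) ++ combos3 t

-- def virus(arr, vrs, n, m): recursive DFS; fuel (n*m+1) is a pure totality guard,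
-- never exhausted on admitted inputs (each recursive call removes one in-bounds zero)
def virusGo : Nat → List (List Int) → Int → Int → Int → Int → List (List Int)
  | 0, g, _, _, _, _ => g
  | Nat.succ f, g, y, x, n, m =>
    dirsA.foldl (fun g d =>
      let ay := y + d.1
      let ax := x + d.2
      if 0 ≤ ay ∧ ay < n ∧ 0 ≤ ax ∧ ax < m then
        if valAt g ay ax = 0 then virusGo f (setAt g ay ax 2) ay ax n m
        else g
      else g) g

-- def check(arr)
def checkA (g : List (List Int)) : Int :=
  g.foldl (fun cnt row => row.foldl (fun c el => if el = 0 then c + 1 else c) cnt) 0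

def serachAll (arr : List (List Int)) (n : Int) (m : Int) : Int :=
  -- scan: stack (empty cells) and virusStack (virus cells), row-major
  let sp := (PySem.List.pyRange 0 n 1).foldl (fun (p : List (Int × Int) × List (Int × Int)) y =>
    (PySem.List.pyRange 0 m 1).foldl (fun p x =>
      let p1 := if valAt arr y x = 0 then (p.1 ++ [(y, x)], p.2) else p
      if valAt arr y x = 2 then (p1.1, p1.2 ++ [(y, x)]) else p1) p) ([], [])
  let stack := sp.1
  let virusStack := sp.2
  let stackCombination := combos3 stack
  stackCombination.foldl (fun temp e =>
    -- walls placed into arr, then deepcopy; the final restore to 0 is a no-op for the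
    -- pure port (the next iteration starts again from the unmodified arr)
    let a1 := setAt arr e.1.1 e.1.2 1
    let a2 := setAt a1 e.2.1.1 e.2.1.2 1
    let arr2 := setAt a2 e.2.2.1 e.2.2.2 1
    let arr2' := virusStack.foldl (fun g ve => virusGo (n.toNat * m.toNat + 1) g ve.1 ve.2 n m) arr2
    max temp (checkA arr2')) 0

-- ===== PORT B =====
-- while stack: pop last, mark 4-neighbour zeros, push them; fuel is a totality guard
-- (stack length + number of in-bounds zeros strictly decreases), never exhausted
def floodB : Nat → Int → Int → List (List Int) → List (Int × Int) → List (List Int)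
  | 0, _, _, g, _ => g
  | Nat.succ f, n, m, g, stack =>
    match stack.getLast? with
    | none => g
    | some c =>
      let gs := dirsA.foldl (fun (gs : List (List Int) × List (Int × Int)) d =>
        let ay := c.1 + d.1
        let ax := c.2 + d.2
        if (0 ≤ ay ∧ ay < n ∧ 0 ≤ ax ∧ ax < m) ∧ valAt gs.1 ay ax = 0 then
          (setAt gs.1 ay ax 2, gs.2 ++ [(ay, ax)])
        else gs) (g, stack.dropLast)
      floodB f n m gs.1 gs.2

def serachAll_alt (arr : List (List Int)) (n : Int) (m : Int) : Int :=
  let empties := (PySem.List.pyRange 0 n 1).flatMap (fun y =>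
    ((PySem.List.pyRange 0 m 1).filter (fun x => valAt arr y x = 0)).map (fun x => (y, x)))
  let viruses := (PySem.List.pyRange 0 n 1).flatMap (fun y =>
    ((PySem.List.pyRange 0 m 1).filter (fun x => valAt arr y x = 2)).map (fun x => (y, x)))
  (combos3 empties).foldl (fun best w =>
    -- grid = [row[:] for row in arr] : per-row copy is the identity on pure lists
    let grid0 := arr.map (fun row => row)
    let gw := [w.1, w.2.1, w.2.2].foldl (fun g c => setAt g c.1 c.2 1) grid0
    let gf := floodB (viruses.length + n.toNat * m.toNat + 1) n m gw viruses
    max best ((gf.map (fun row => (PySem.List.count row 0 : Int))).sum)) 0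

-- ===== PRECONDITION & SPEC =====
-- Pre_ excludes exactly the inputs where A's scan raises IndexError (B raises there too):
-- positive n and m with n larger than the number of rows, or m larger than some scanned row's length.
def Pre_serachAll (arr : List (List Int)) (n : Int) (m : Int) : Prop :=
  0 < n → 0 < m → n ≤ (arr.length : Int) ∧ ∀ row ∈ arr.take n.toNat, m ≤ (row.length : Int)
instance (arr : List (List Int)) (n : Int) (m : Int) : Decidable (Pre_serachAll arr n m) := by
  unfold Pre_serachAll; infer_instance

def pvWitness_serachAll : List (List Int) × Int × Int := ([[2, 0, 0], [0, 0, 1]], 2, 3)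

def Spec_serachAll (arr : List (List Int)) (n : Int) (m : Int) (out : Int) : Prop := out = serachAll_alt arr n m
instance (arr : List (List Int)) (n : Int) (m : Int) (out : Int) : Decidable (Spec_serachAll arr n m out) := by unfold Spec_serachAll; infer_instance

-- ===== CLAIM (what is proved, stated in full; the proofs are below) =====
def Claim_equal_serachAll : Prop := ∀ (arr : List (List Int)) (n : Int) (m : Int), Dom_serachAll arr n m → Pre_serachAll arr n m → Spec_serachAll arr n m (serachAll arr n m)

-- ===== LEMMAS AND PROOFS =====

def entry (g : List (List Int)) (i j : Nat) : Int := (g.getD i []).getD j 0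

def shapeOf (g : List (List Int)) : List Nat := g.map List.length

def inb (n m : Int) (c : Int × Int) : Prop := 0 ≤ c.1 ∧ c.1 < n ∧ 0 ≤ c.2 ∧ c.2 < m

def adjc (c d : Int × Int) : Prop := (d.1 - c.1, d.2 - c.2) ∈ dirsA

-- cells infected starting from the virus cells of g0 through in-bounds zeros
inductive Reach (g0 : List (List Int)) (n m : Int) : Int × Int → Prop
  | base (c : Int × Int) : inb n m c → valAt g0 c.1 c.2 = 2 → Reach g0 n m c
  | step (c d : Int × Int) : Reach g0 n m d → inb n m c → valAt g0 c.1 c.2 = 0 → adjc d c → Reach g0 n m c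

-- g differs from g0 only by infecting reachable in-bounds zeros
def Sound (g0 : List (List Int)) (n m : Int) (g : List (List Int)) : Prop :=
  shapeOf g = shapeOf g0 ∧
  ∀ i j : Nat, entry g i j = entry g0 i j ∨
    (inb n m ((i : Int), (j : Int)) ∧ entry g0 i j = 0 ∧ entry g i j = 2 ∧ Reach g0 n m ((i : Int), (j : Int)))

-- g grows from g' only by turning zeros into 2s
def Mono (g g' : List (List Int)) : Prop :=
  ∀ i j : Nat, entry g' i j = entry g i j ∨ (entry g i j = 0 ∧ entry g' i j = 2)

def NoZN (n m : Int) (g : List (List Int)) (c : Int × Int) : Prop :=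
  ∀ d, inb n m d → adjc c d → valAt g d.1 d.2 ≠ 0

def Sat (n m : Int) (g : List (List Int)) : Prop :=
  ∀ c, inb n m c → valAt g c.1 c.2 = 2 → NoZN n m g c

def ValidIdx (g : List (List Int)) (n m : Int) : Prop :=
  ∀ c : Int × Int, inb n m c → c.1.toNat < g.length ∧ c.2.toNat < (g.getD c.1.toNat []).length

def Zin (n m : Int) (g : List (List Int)) : Nat :=
  ((List.range n.toNat).map (fun i => ((List.range m.toNat).filter (fun j => entry g i j = 0)).length)).sum


theorem valAt_eq_entry (g : List (List Int)) (y x : Int) : valAt g y x = entry g y.toNat x.toNat := rfl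

theorem entry_eq_getElem? (g : List (List Int)) (i j : Nat) :
    entry g i j = ((g[i]?.getD []).getD j 0 : Int) := by
  simp [entry, List.getD_eq_getElem?_getD]

theorem shape_setAt (g : List (List Int)) (y x : Int) (v : Int) :
    shapeOf (setAt g y x v) = shapeOf g := by
  apply List.ext_getElem
  · simp [shapeOf, setAt]
  · intro i h1 h2
    simp [shapeOf, setAt, List.getElem_modify]
    split_ifs <;> simp

theorem length_of_shape {g g' : List (List Int)} (h : shapeOf g = shapeOf g') :
    g.length = g'.length := by
  have := congrArg List.length h
  simpa [shapeOf] using this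

theorem rowlen_of_shape {g g' : List (List Int)} (h : shapeOf g = shapeOf g') (i : Nat) :
    (g.getD i []).length = (g'.getD i []).length := by
  have hl := length_of_shape h
  by_cases hi : i < g.length
  · have h1 : (shapeOf g)[i]? = (shapeOf g')[i]? := by rw [h]
    simp [shapeOf, List.getElem?_map, List.getD_eq_getElem?_getD] at h1 ⊢
    rw [List.getElem?_eq_getElem hi, List.getElem?_eq_getElem (hl ▸ hi)] at h1 ⊢
    simpa using h1
  · have hi' : ¬ i < g'.length := by omega
    simp [List.getD_eq_getElem?_getD, List.getElem?_eq_none (by omega : g.length ≤ i),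
      List.getElem?_eq_none (by omega : g'.length ≤ i)]

theorem entry_setAt_ne (g : List (List Int)) (y x : Int) (v : Int) (i j : Nat)
    (h : i ≠ y.toNat ∨ j ≠ x.toNat) :
    entry (setAt g y x v) i j = entry g i j := by
  rcases h with h | h
  · simp [entry_eq_getElem?, setAt, List.getElem?_modify, if_neg (fun hh => h (Eq.symm hh))]
  · simp only [entry_eq_getElem?, setAt, List.getElem?_modify]
    by_cases hi : y.toNat = i
    · subst hi
      cases hg : g[y.toNat]? with
      | none => simp
      | some row => simp [List.getElem?_set, if_neg (fun hh => h (Eq.symm hh))]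
    · simp [if_neg hi]

theorem entry_setAt_self (g : List (List Int)) (y x : Int) (v : Int)
    (h1 : y.toNat < g.length) (h2 : x.toNat < (g.getD y.toNat []).length) :
    entry (setAt g y x v) y.toNat x.toNat = v := by
  have h2' : x.toNat < (g[y.toNat]).length := by
    rw [List.getD_eq_getElem?_getD, List.getElem?_eq_getElem h1] at h2; simpa using h2
  simp [entry_eq_getElem?, setAt, List.getElem?_modify, List.getElem?_eq_getElem h1,
    List.getD_eq_getElem?_getD, List.getElem?_set_self h2']

theorem entry_setAt_cases (g : List (List Int)) (y x : Int) (v : Int) (i j : Nat) :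
    entry (setAt g y x v) i j = entry g i j ∨
    (i = y.toNat ∧ j = x.toNat ∧ entry (setAt g y x v) i j = v) := by
  by_cases hi : i = y.toNat
  · by_cases hj : j = x.toNat
    · subst hi; subst hj
      by_cases h1 : y.toNat < g.length
      · by_cases h2 : x.toNat < (g.getD y.toNat []).length
        · exact Or.inr ⟨rfl, rfl, entry_setAt_self g y x v h1 h2⟩
        · left
          have h2' : ¬ x.toNat < (g[y.toNat]).length := by
            rw [List.getD_eq_getElem?_getD, List.getElem?_eq_getElem h1] at h2; simpa using h2
          simp [entry_eq_getElem?, setAt, List.getElem?_modify, List.getElem?_eq_getElem h1,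
            List.getD_eq_getElem?_getD, List.getElem?_set, if_neg h2',
            List.getElem?_eq_none (by omega : (g[y.toNat]).length ≤ x.toNat)]
      · left
        simp [entry_eq_getElem?, setAt, List.getElem?_modify,
          List.getElem?_eq_none (by omega : g.length ≤ y.toNat)]
    · exact Or.inl (entry_setAt_ne g y x v i j (Or.inr hj))
  · exact Or.inl (entry_setAt_ne g y x v i j (Or.inl hi))


theorem Mono_refl (g : List (List Int)) : Mono g g := fun _ _ => Or.inl rfl

theorem Mono_trans {g g1 g2 : List (List Int)} (h1 : Mono g g1) (h2 : Mono g1 g2) : Mono g g2 := by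
  intro i j
  rcases h2 i j with h | h
  · rcases h1 i j with h' | h'
    · exact Or.inl (h.trans h')
    · exact Or.inr ⟨h'.1, h ▸ h'.2⟩
  · rcases h1 i j with h' | h'
    · exact Or.inr ⟨h'.symm ▸ h.1, h.2⟩
    · exact Or.inr ⟨h'.1, h.2⟩

theorem Mono_two {g g' : List (List Int)} (h : Mono g g') {i j : Nat}
    (h2 : entry g i j = 2) : entry g' i j = 2 := by
  rcases h i j with h' | h'
  · omega
  · exact h'.2

theorem Mono_zero_back {g g' : List (List Int)} (h : Mono g g') {i j : Nat}
    (h0 : entry g' i j = 0) : entry g i j = 0 := by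
  rcases h i j with h' | h' <;> omega

theorem NoZN_mono {n m : Int} {g g' : List (List Int)} (hm : Mono g g') {c : Int × Int}
    (h : NoZN n m g c) : NoZN n m g' c := by
  intro d hd ha
  have := h d hd ha
  rw [valAt_eq_entry] at this ⊢
  intro h0
  exact this (Mono_zero_back hm h0)

theorem Mono_setAt {g : List (List Int)} {y x : Int}
    (h0 : entry g y.toNat x.toNat = 0) : Mono g (setAt g y x 2) := by
  intro i j
  rcases entry_setAt_cases g y x 2 i j with h | ⟨hi, hj, h⟩
  · exact Or.inl h
  · exact Or.inr ⟨hi ▸ hj ▸ h0, h⟩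

theorem ValidIdx_of_shape {g0 g : List (List Int)} {n m : Int}
    (hv : ValidIdx g0 n m) (hs : shapeOf g = shapeOf g0) : ValidIdx g n m := by
  intro c hc
  obtain ⟨h1, h2⟩ := hv c hc
  exact ⟨(length_of_shape hs) ▸ h1, (rowlen_of_shape hs c.1.toNat) ▸ h2⟩

theorem countP_flip {l : List Nat} (hnd : l.Nodup) {x : Nat} (hx : x ∈ l)
    {p p' : Nat → Bool} (hpx : p x = true) (hp'x : p' x = false)
    (hag : ∀ y ∈ l, y ≠ x → p y = p' y) : l.countP p = l.countP p' + 1 := by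
  induction l with
  | nil => cases hx
  | cons a t ih =>
    rcases List.nodup_cons.mp hnd with ⟨hna, hnt⟩
    by_cases hax : a = x
    · subst hax
      have heq : t.countP p = t.countP p' :=
        List.countP_congr (fun y hy => by rw [hag y (List.mem_cons_of_mem _ hy) (fun h => hna (h ▸ hy))])
      simp [List.countP_cons, hpx, hp'x, heq]
    · have hx' : x ∈ t := by
        rcases List.mem_cons.mp hx with h | h
        · exact absurd h.symm hax
        · exact h
      have := ih hnt hx' (fun y hy hne => hag y (List.mem_cons_of_mem _ hy) hne)
      have ha' : p a = p' a := hag a List.mem_cons_self hax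
      simp [List.countP_cons, ha', this]
      omega

theorem sum_map_flip {l : List Nat} (hnd : l.Nodup) {x : Nat} (hx : x ∈ l)
    {f f' : Nat → Nat} (hfx : f x = f' x + 1)
    (hag : ∀ y ∈ l, y ≠ x → f y = f' y) : (l.map f).sum = (l.map f').sum + 1 := by
  induction l with
  | nil => cases hx
  | cons a t ih =>
    rcases List.nodup_cons.mp hnd with ⟨hna, hnt⟩
    by_cases hax : a = x
    · subst hax
      have heq : t.map f = t.map f' :=
        List.map_congr_left (fun y hy => hag y (List.mem_cons_of_mem _ hy) (fun h => hna (h ▸ hy)))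
      simp [heq, hfx]; omega
    · have hx' : x ∈ t := by
        rcases List.mem_cons.mp hx with h | h
        · exact absurd h.symm hax
        · exact h
      have := ih hnt hx' (fun y hy hne => hag y (List.mem_cons_of_mem _ hy) hne)
      have ha' : f a = f' a := hag a List.mem_cons_self hax
      simp [ha', this]; omega

theorem Zin_le (n m : Int) (g : List (List Int)) : Zin n m g ≤ n.toNat * m.toNat := by
  unfold Zin
  calc ((List.range n.toNat).map (fun i => ((List.range m.toNat).filter (fun j => entry g i j = 0)).length)).sum
      ≤ ((List.range n.toNat).map (fun _ => m.toNat)).sum := by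
        apply List.sum_le_sum
        intro i _
        calc ((List.range m.toNat).filter (fun j => entry g i j = 0)).length
            ≤ (List.range m.toNat).length := List.length_filter_le _ _
          _ = m.toNat := List.length_range
    _ = n.toNat * m.toNat := by
        simp [List.map_const', List.sum_replicate, Nat.smul_one_eq_cast]

theorem Zin_setAt {n m : Int} {g : List (List Int)} (hv : ValidIdx g n m) {c : Int × Int}
    (hc : inb n m c) (h0 : entry g c.1.toNat c.2.toNat = 0) :
    Zin n m (setAt g c.1 c.2 2) + 1 = Zin n m g := by
  obtain ⟨hy0, hyn, hx0, hxm⟩ := hc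
  have hyN : c.1.toNat < n.toNat := by omega
  have hxN : c.2.toNat < m.toNat := by omega
  obtain ⟨hl, hr⟩ := hv c ⟨hy0, hyn, hx0, hxm⟩
  unfold Zin
  have key : ((List.range n.toNat).map (fun i => ((List.range m.toNat).filter (fun j => entry g i j = 0)).length)).sum
      = ((List.range n.toNat).map (fun i => ((List.range m.toNat).filter (fun j => entry (setAt g c.1 c.2 2) i j = 0)).length)).sum + 1 := by
    apply sum_map_flip List.nodup_range (List.mem_range.mpr hyN)
    · rw [← List.countP_eq_length_filter, ← List.countP_eq_length_filter]
      exact countP_flip List.nodup_range (List.mem_range.mpr hxN)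
        (by simp [h0]) (by simp [entry_setAt_self g c.1 c.2 2 hl hr])
        (fun y hy hne => by simp [entry_setAt_ne g c.1 c.2 2 _ _ (Or.inr hne)])
    · intro y hy hne
      have : ∀ j, entry (setAt g c.1 c.2 2) y j = entry g y j :=
        fun j => entry_setAt_ne g c.1 c.2 2 _ _ (Or.inl hne)
      simp [this]
  omega


theorem cell_eq_coe {c : Int × Int} (h1 : 0 ≤ c.1) (h2 : 0 ≤ c.2) :
    ((c.1.toNat : Int), (c.2.toNat : Int)) = c := by
  obtain ⟨a, b⟩ := c
  simp at h1 h2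
  simp [Int.toNat_of_nonneg h1, Int.toNat_of_nonneg h2]

theorem pair_coe {a b : Int} (h1 : 0 ≤ a) (h2 : 0 ≤ b) :
    ((a.toNat : Int), (b.toNat : Int)) = (a, b) := by
  simp [Int.toNat_of_nonneg h1, Int.toNat_of_nonneg h2]

theorem valAt_coe (g : List (List Int)) (i j : Nat) : valAt g (i : Int) (j : Int) = entry g i j := by
  simp [valAt_eq_entry]

theorem adjc_of_dir {c d : Int × Int} (hd : d ∈ dirsA) : adjc c (c.1 + d.1, c.2 + d.2) := by
  have h : ((c.1 + d.1) - c.1, (c.2 + d.2) - c.2) = d := by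
    obtain ⟨a, b⟩ := d; simp
  unfold adjc
  simpa [h] using hd

theorem exists_dir_of_adjc {c d : Int × Int} (h : adjc c d) :
    ∃ e ∈ dirsA, d = (c.1 + e.1, c.2 + e.2) := by
  refine ⟨(d.1 - c.1, d.2 - c.2), h, ?_⟩
  obtain ⟨a, b⟩ := d; simp

theorem Sound_at {g0 g : List (List Int)} {n m : Int} (hS : Sound g0 n m g)
    {c : Int × Int} (hc : inb n m c) :
    valAt g c.1 c.2 = valAt g0 c.1 c.2 ∨
    (valAt g0 c.1 c.2 = 0 ∧ valAt g c.1 c.2 = 2 ∧ Reach g0 n m c) := by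
  obtain ⟨h1, h2, h3, h4⟩ := hc
  have := hS.2 c.1.toNat c.2.toNat
  rw [cell_eq_coe h1 h3] at this
  rcases this with h | h
  · exact Or.inl (by rw [valAt_eq_entry, valAt_eq_entry]; exact h)
  · exact Or.inr ⟨by rw [valAt_eq_entry]; exact h.2.1, by rw [valAt_eq_entry]; exact h.2.2.1, h.2.2.2⟩

theorem Reach_inb {g0 : List (List Int)} {n m : Int} {c : Int × Int}
    (h : Reach g0 n m c) : inb n m c := by
  induction h with
  | base c hc _ => exact hc
  | step c d _ hc _ _ _ => exact hc

theorem reach_two {g0 g : List (List Int)} {n m : Int}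
    (hS : Sound g0 n m g) (hT : Sat n m g) :
    ∀ c, Reach g0 n m c → valAt g c.1 c.2 = 2 := by
  intro c h
  induction h with
  | base c hc h2 =>
    rcases Sound_at hS hc with h | h
    · rw [h]; exact h2
    · exact h.2.1
  | step c d hd hc h0 ha ih =>
    have hnz : valAt g c.1 c.2 ≠ 0 := hT d (Reach_inb hd) ih c hc ha
    rcases Sound_at hS hc with h | h
    · rw [h] at hnz; exact absurd h0 hnz
    · exact h.2.1

theorem canon_entry {g0 g1 g2 : List (List Int)} {n m : Int}
    (hS1 : Sound g0 n m g1) (hT1 : Sat n m g1)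
    (hS2 : Sound g0 n m g2) (hT2 : Sat n m g2) (i j : Nat) :
    entry g1 i j = entry g2 i j := by
  by_cases h : inb n m ((i : Int), (j : Int)) ∧ Reach g0 n m ((i : Int), (j : Int))
  · have e1 := reach_two hS1 hT1 _ h.2
    have e2 := reach_two hS2 hT2 _ h.2
    rw [valAt_coe] at e1 e2
    rw [e1, e2]
  · have h1 : entry g1 i j = entry g0 i j := by
      rcases hS1.2 i j with h' | h'
      · exact h'
      · exact absurd ⟨h'.1, h'.2.2.2⟩ h
    have h2 : entry g2 i j = entry g0 i j := by
      rcases hS2.2 i j with h' | h'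
      · exact h'
      · exact absurd ⟨h'.1, h'.2.2.2⟩ h
    rw [h1, h2]

theorem grid_ext {g1 g2 : List (List Int)} (hs : shapeOf g1 = shapeOf g2)
    (he : ∀ i j, entry g1 i j = entry g2 i j) : g1 = g2 := by
  apply List.ext_getElem (length_of_shape hs)
  intro i h1 h2
  apply List.ext_getElem
  · have := rowlen_of_shape hs i
    rwa [List.getD_eq_getElem?_getD, List.getD_eq_getElem?_getD,
      List.getElem?_eq_getElem h1, List.getElem?_eq_getElem h2,
      Option.getD_some, Option.getD_some] at this
  · intro j hj1 hj2
    have := he i j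
    simp only [entry_eq_getElem?, List.getElem?_eq_getElem h1, List.getElem?_eq_getElem h2,
      Option.getD_some] at this
    rwa [List.getD_eq_getElem?_getD, List.getD_eq_getElem?_getD,
      List.getElem?_eq_getElem hj1, List.getElem?_eq_getElem hj2,
      Option.getD_some, Option.getD_some] at this

theorem grids_eq {g0 g1 g2 : List (List Int)} {n m : Int}
    (hS1 : Sound g0 n m g1) (hT1 : Sat n m g1)
    (hS2 : Sound g0 n m g2) (hT2 : Sat n m g2) : g1 = g2 :=
  grid_ext (hS1.1.trans hS2.1.symm) (canon_entry hS1 hT1 hS2 hT2)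


def vgStep (f : Nat) (n m y x : Int) (g : List (List Int)) (d : Int × Int) : List (List Int) :=
  if 0 ≤ y + d.1 ∧ y + d.1 < n ∧ 0 ≤ x + d.2 ∧ x + d.2 < m then
    if valAt g (y + d.1) (x + d.2) = 0 then virusGo f (setAt g (y + d.1) (x + d.2) 2) (y + d.1) (x + d.2) n m
    else g
  else g

theorem virusGo_succ (f : Nat) (g : List (List Int)) (y x n m : Int) :
    virusGo (f + 1) g y x n m = dirsA.foldl (vgStep f n m y x) g := rfl

def VGP (g0 : List (List Int)) (n m : Int) (f : Nat) : Prop :=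
  ∀ (g : List (List Int)) (s : Int × Int),
    Zin n m g < f → inb n m s → valAt g s.1 s.2 = 2 → Sound g0 n m g → Reach g0 n m s →
    Mono g (virusGo f g s.1 s.2 n m) ∧
    Zin n m (virusGo f g s.1 s.2 n m) ≤ Zin n m g ∧
    Sound g0 n m (virusGo f g s.1 s.2 n m) ∧
    NoZN n m (virusGo f g s.1 s.2 n m) s ∧
    (∀ c, inb n m c → valAt g c.1 c.2 ≠ 2 → valAt (virusGo f g s.1 s.2 n m) c.1 c.2 = 2 →
      NoZN n m (virusGo f g s.1 s.2 n m) c)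

set_option maxHeartbeats 1000000 in
theorem vg_fold {g0 : List (List Int)} {n m : Int} (hv : ValidIdx g0 n m) (f : Nat)
    (IH : VGP g0 n m f) (s : Int × Int) (hs : inb n m s) (hr : Reach g0 n m s) :
    ∀ (ds : List (Int × Int)), (∀ d ∈ ds, d ∈ dirsA) →
    ∀ (g : List (List Int)), Zin n m g ≤ f → valAt g s.1 s.2 = 2 → Sound g0 n m g →
    Mono g (ds.foldl (vgStep f n m s.1 s.2) g) ∧
    Zin n m (ds.foldl (vgStep f n m s.1 s.2) g) ≤ Zin n m g ∧
    Sound g0 n m (ds.foldl (vgStep f n m s.1 s.2) g) ∧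
    (∀ d ∈ ds, inb n m (s.1 + d.1, s.2 + d.2) →
      valAt (ds.foldl (vgStep f n m s.1 s.2) g) (s.1 + d.1) (s.2 + d.2) ≠ 0) ∧
    (∀ c, inb n m c → valAt g c.1 c.2 ≠ 2 → valAt (ds.foldl (vgStep f n m s.1 s.2) g) c.1 c.2 = 2 →
      NoZN n m (ds.foldl (vgStep f n m s.1 s.2) g) c) := by
  intro ds
  induction ds with
  | nil =>
    intro _ g hB h2 hS
    refine ⟨Mono_refl g, le_refl _, hS, by simp, ?_⟩
    intro c _ hne h2'
    exact absurd h2' hne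
  | cons d ds ihds =>
    intro hds g hB h2 hS
    rw [List.foldl_cons]
    have hdmem : d ∈ dirsA := hds d List.mem_cons_self
    set ay := s.1 + d.1 with hay
    set ax := s.2 + d.2 with haxx
    by_cases hP : 0 ≤ ay ∧ ay < n ∧ 0 ≤ ax ∧ ax < m
    · by_cases h0 : valAt g ay ax = 0
      · -- mark and recurse
        have hstep : vgStep f n m s.1 s.2 g d = virusGo f (setAt g ay ax 2) ay ax n m := by
          rw [vgStep, if_pos hP, if_pos h0]
        rw [hstep]
        have hinb : inb n m (ay, ax) := hP
        have hvg : ValidIdx g n m := ValidIdx_of_shape hv hS.1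
        obtain ⟨hl, hrr⟩ := hvg (ay, ax) hinb
        have h0e : entry g ay.toNat ax.toNat = 0 := by rwa [valAt_eq_entry] at h0
        have hg2self : entry (setAt g ay ax 2) ay.toNat ax.toNat = 2 := entry_setAt_self g ay ax 2 hl hrr
        have hmono2 : Mono g (setAt g ay ax 2) := Mono_setAt h0e
        have hg0zero : entry g0 ay.toNat ax.toNat = 0 := by
          rcases hS.2 ay.toNat ax.toNat with h' | h'
          · rw [← h']; exact h0e
          · rw [h'.2.2.1] at h0e; cases h0e
        have hreach2 : Reach g0 n m (ay, ax) := by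
          refine Reach.step (ay, ax) s hr hinb ?_ (adjc_of_dir hdmem)
          rw [valAt_eq_entry]
          exact hg0zero
        have hS2 : Sound g0 n m (setAt g ay ax 2) := by
          refine ⟨(shape_setAt g ay ax 2).trans hS.1, ?_⟩
          intro i j
          rcases entry_setAt_cases g ay ax 2 i j with h' | ⟨hi, hj, h'⟩
          · rcases hS.2 i j with h'' | h''
            · exact Or.inl (h'.trans h'')
            · exact Or.inr ⟨h''.1, h''.2.1, h'.trans h''.2.2.1, h''.2.2.2⟩
          · subst hi; subst hj
            refine Or.inr ⟨?_, ?_, h', ?_⟩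
            · rw [pair_coe hP.1 hP.2.2.1]
              exact hinb
            · exact hg0zero
            · rw [pair_coe hP.1 hP.2.2.1]
              exact hreach2
        have hZ2 : Zin n m (setAt g ay ax 2) + 1 = Zin n m g := Zin_setAt hvg hinb h0e
        have hval2 : valAt (setAt g ay ax 2) ay ax = 2 := by rw [valAt_eq_entry]; exact hg2self
        obtain ⟨m3, z3, s3, n3, k3⟩ := IH (setAt g ay ax 2) (ay, ax) (by omega) hinb hval2 hS2 hreach2
        set g3 := virusGo f (setAt g ay ax 2) ay ax n m with hg3
        have hval3s : valAt g3 s.1 s.2 = 2 := by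
          rw [valAt_eq_entry] at h2 ⊢
          exact Mono_two m3 (Mono_two hmono2 h2)
        obtain ⟨mds, zds, sds, nds, kds⟩ := ihds (fun d' hd' => hds d' (List.mem_cons_of_mem _ hd'))
          g3 (by omega) hval3s s3
        have hmono23 : Mono g g3 := Mono_trans hmono2 m3
        have hmonoAll : Mono g (List.foldl (vgStep f n m s.1 s.2) g3 ds) := Mono_trans hmono23 mds
        refine ⟨hmonoAll, by omega, sds, ?_, ?_⟩
        · intro d' hd' hinb'
          rcases List.mem_cons.mp hd' with hd'' | hd''
          · subst hd''
            rw [valAt_eq_entry]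
            have : entry g3 ay.toNat ax.toNat = 2 := Mono_two m3 hg2self
            have := Mono_two mds this
            rw [← hay, ← haxx]
            omega
          · exact nds d' hd'' hinb'
        · intro c hc hne h2'
          by_cases hc3 : valAt g3 c.1 c.2 = 2
          · by_cases hc2 : valAt (setAt g ay ax 2) c.1 c.2 = 2
            · -- c must be the newly marked cell
              have hcc : c = (ay, ax) := by
                rw [valAt_eq_entry] at hc2 hne
                rcases entry_setAt_cases g ay ax 2 c.1.toNat c.2.toNat with h' | ⟨hi, hj, _⟩
                · rw [h'] at hc2; exact absurd hc2 hne
                · obtain ⟨hc1, hc2', hc3', hc4⟩ := hc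
                  obtain ⟨a, b⟩ := c
                  simp at hi hj hc1 hc3' ⊢
                  omega
              rw [hcc]
              exact NoZN_mono mds n3
            · exact NoZN_mono mds (k3 c hc hc2 hc3)
          · exact kds c hc hc3 h2'
      · have hstep : vgStep f n m s.1 s.2 g d = g := by
          rw [vgStep, if_pos hP, if_neg h0]
        rw [hstep]
        obtain ⟨mds, zds, sds, nds, kds⟩ := ihds (fun d' hd' => hds d' (List.mem_cons_of_mem _ hd'))
          g hB h2 hS
        refine ⟨mds, zds, sds, ?_, kds⟩
        intro d' hd' hinb'
        rcases List.mem_cons.mp hd' with hd'' | hd''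
        · subst hd''
          rw [valAt_eq_entry] at h0 ⊢
          intro hz
          exact h0 (Mono_zero_back mds hz)
        · exact nds d' hd'' hinb'
    · have hstep : vgStep f n m s.1 s.2 g d = g := by
        rw [vgStep, if_neg hP]
      rw [hstep]
      obtain ⟨mds, zds, sds, nds, kds⟩ := ihds (fun d' hd' => hds d' (List.mem_cons_of_mem _ hd'))
        g hB h2 hS
      refine ⟨mds, zds, sds, ?_, kds⟩
      intro d' hd' hinb'
      rcases List.mem_cons.mp hd' with hd'' | hd''
      · subst hd''
        exact absurd hinb' hP
      · exact nds d' hd'' hinb'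

theorem vg_main {g0 : List (List Int)} {n m : Int} (hv : ValidIdx g0 n m) :
    ∀ f : Nat, VGP g0 n m f := by
  intro f
  induction f with
  | zero => intro g s hZ; omega
  | succ f ihf =>
    intro g s hZ hs h2 hS hr
    rw [virusGo_succ]
    obtain ⟨mds, zds, sds, nds, kds⟩ := vg_fold hv f ihf s hs hr dirsA (fun _ h => h) g (by omega) h2 hS
    refine ⟨mds, zds, sds, ?_, kds⟩
    intro d hd hadj
    obtain ⟨e, he, hde⟩ := exists_dir_of_adjc hadj
    rw [hde]
    exact nds e he (hde ▸ hd)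


theorem A_flood {g0 : List (List Int)} {n m : Int} (hv : ValidIdx g0 n m) :
    ∀ (vs : List (Int × Int)) (g : List (List Int)),
    Sound g0 n m g →
    (∀ c ∈ vs, inb n m c ∧ valAt g c.1 c.2 = 2 ∧ Reach g0 n m c) →
    (∀ c, inb n m c → valAt g c.1 c.2 = 2 → c ∈ vs ∨ NoZN n m g c) →
    Sound g0 n m (vs.foldl (fun g ve => virusGo (n.toNat * m.toNat + 1) g ve.1 ve.2 n m) g) ∧
    Sat n m (vs.foldl (fun g ve => virusGo (n.toNat * m.toNat + 1) g ve.1 ve.2 n m) g) := by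
  intro vs
  induction vs with
  | nil =>
    intro g hS hvs hinv
    refine ⟨hS, ?_⟩
    intro c hc h2
    rcases hinv c hc h2 with h | h
    · cases h
    · exact h
  | cons ve vs ih =>
    intro g hS hvs hinv
    rw [List.foldl_cons]
    obtain ⟨hinb, h2, hre⟩ := hvs ve List.mem_cons_self
    have hZ : Zin n m g < n.toNat * m.toNat + 1 := by
      have := Zin_le n m g; omega
    obtain ⟨m3, z3, s3, n3, k3⟩ := vg_main hv (n.toNat * m.toNat + 1) g ve hZ hinb h2 hS hre
    set g1 := virusGo (n.toNat * m.toNat + 1) g ve.1 ve.2 n m with hg1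
    apply ih g1 s3
    · intro c hc
      obtain ⟨hcinb, hc2, hcre⟩ := hvs c (List.mem_cons_of_mem _ hc)
      refine ⟨hcinb, ?_, hcre⟩
      rw [valAt_eq_entry] at hc2 ⊢
      exact Mono_two m3 hc2
    · intro c hc h2'
      by_cases hcg : valAt g c.1 c.2 = 2
      · rcases hinv c hc hcg with h | h
        · rcases List.mem_cons.mp h with h' | h'
          · subst h'
            exact Or.inr n3
          · exact Or.inl h'
        · exact Or.inr (NoZN_mono m3 h)
      · exact Or.inr (k3 c hc hcg h2')

theorem Sound_mark {g0 : List (List Int)} {n m : Int} (hv : ValidIdx g0 n m)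
    {g : List (List Int)} (hS : Sound g0 n m g) {c w : Int × Int}
    (hrc : Reach g0 n m c) (hw : inb n m w) (hadj : adjc c w)
    (h0 : valAt g w.1 w.2 = 0) :
    Sound g0 n m (setAt g w.1 w.2 2) ∧ Reach g0 n m w ∧ Mono g (setAt g w.1 w.2 2) ∧
    Zin n m (setAt g w.1 w.2 2) + 1 = Zin n m g ∧ valAt (setAt g w.1 w.2 2) w.1 w.2 = 2 := by
  have hvg : ValidIdx g n m := ValidIdx_of_shape hv hS.1
  obtain ⟨hl, hrr⟩ := hvg w hw
  have h0e : entry g w.1.toNat w.2.toNat = 0 := by rwa [valAt_eq_entry] at h0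
  have hself : entry (setAt g w.1 w.2 2) w.1.toNat w.2.toNat = 2 := entry_setAt_self g w.1 w.2 2 hl hrr
  have hg0zero : entry g0 w.1.toNat w.2.toNat = 0 := by
    rcases hS.2 w.1.toNat w.2.toNat with h' | h'
    · rw [← h']; exact h0e
    · rw [h'.2.2.1] at h0e; cases h0e
  have hreachw : Reach g0 n m w := by
    refine Reach.step w c hrc hw ?_ hadj
    rw [valAt_eq_entry]
    exact hg0zero
  refine ⟨⟨(shape_setAt g w.1 w.2 2).trans hS.1, ?_⟩, hreachw, Mono_setAt h0e,
    Zin_setAt hvg hw h0e, by rw [valAt_eq_entry]; exact hself⟩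
  intro i j
  rcases entry_setAt_cases g w.1 w.2 2 i j with h' | ⟨hi, hj, h'⟩
  · rcases hS.2 i j with h'' | h''
    · exact Or.inl (h'.trans h'')
    · exact Or.inr ⟨h''.1, h''.2.1, h'.trans h''.2.2.1, h''.2.2.2⟩
  · subst hi; subst hj
    refine Or.inr ⟨?_, hg0zero, h', ?_⟩
    · rw [pair_coe hw.1 hw.2.2.1]; exact hw
    · rw [pair_coe hw.1 hw.2.2.1]; exact hreachw

def bStep (n m : Int) (c : Int × Int) (gs : List (List Int) × List (Int × Int)) (d : Int × Int) :
    List (List Int) × List (Int × Int) :=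
  if (0 ≤ c.1 + d.1 ∧ c.1 + d.1 < n ∧ 0 ≤ c.2 + d.2 ∧ c.2 + d.2 < m) ∧ valAt gs.1 (c.1 + d.1) (c.2 + d.2) = 0 then
    (setAt gs.1 (c.1 + d.1) (c.2 + d.2) 2, gs.2 ++ [(c.1 + d.1, c.2 + d.2)])
  else gs

theorem floodB_succ (f : Nat) (n m : Int) (g : List (List Int)) (stack : List (Int × Int)) :
    floodB (f + 1) n m g stack =
      match stack.getLast? with
      | none => g
      | some c =>
        floodB f n m (dirsA.foldl (bStep n m c) (g, stack.dropLast)).1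
          (dirsA.foldl (bStep n m c) (g, stack.dropLast)).2 := rfl

theorem B_fold {g0 : List (List Int)} {n m : Int} (hv : ValidIdx g0 n m)
    {c : Int × Int} (hcinb : inb n m c) (hrc : Reach g0 n m c) :
    ∀ (ds : List (Int × Int)), (∀ d ∈ ds, d ∈ dirsA) →
    ∀ (g : List (List Int)) (st : List (Int × Int)), Sound g0 n m g →
    Mono g (ds.foldl (bStep n m c) (g, st)).1 ∧
    Sound g0 n m (ds.foldl (bStep n m c) (g, st)).1 ∧
    (ds.foldl (bStep n m c) (g, st)).2.length + Zin n m (ds.foldl (bStep n m c) (g, st)).1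
      = st.length + Zin n m g ∧
    (∀ x ∈ st, x ∈ (ds.foldl (bStep n m c) (g, st)).2) ∧
    (∀ x ∈ (ds.foldl (bStep n m c) (g, st)).2, x ∈ st ∨
      (inb n m x ∧ valAt (ds.foldl (bStep n m c) (g, st)).1 x.1 x.2 = 2 ∧ Reach g0 n m x)) ∧
    (∀ d ∈ ds, inb n m (c.1 + d.1, c.2 + d.2) →
      valAt (ds.foldl (bStep n m c) (g, st)).1 (c.1 + d.1) (c.2 + d.2) ≠ 0) ∧
    (∀ x, inb n m x → valAt (ds.foldl (bStep n m c) (g, st)).1 x.1 x.2 = 2 →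
      valAt g x.1 x.2 = 2 ∨ x ∈ (ds.foldl (bStep n m c) (g, st)).2) := by
  intro ds
  induction ds with
  | nil =>
    intro _ g st hS
    exact ⟨Mono_refl g, hS, rfl, fun x hx => hx, fun x hx => Or.inl hx, by simp,
      fun x _ h2 => Or.inl h2⟩
  | cons d ds ihds =>
    intro hds g st hS
    rw [List.foldl_cons]
    have hdmem : d ∈ dirsA := hds d List.mem_cons_self
    set ay := c.1 + d.1 with hay
    set ax := c.2 + d.2 with haxx
    by_cases hP : (0 ≤ ay ∧ ay < n ∧ 0 ≤ ax ∧ ax < m) ∧ valAt g ay ax = 0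
    · have hstep : bStep n m c (g, st) d = (setAt g ay ax 2, st ++ [(ay, ax)]) := by
        rw [bStep, if_pos hP]
      rw [hstep]
      have hwinb : inb n m (ay, ax) := hP.1
      obtain ⟨hS1, hrw, hm1, hz1, hval1⟩ :=
        Sound_mark hv hS (w := (ay, ax)) hrc hwinb (adjc_of_dir hdmem) hP.2
      dsimp only at hS1 hrw hm1 hz1 hval1
      obtain ⟨mds, sds, zds, pds, qds, nds, kds⟩ :=
        ihds (fun d' hd' => hds d' (List.mem_cons_of_mem _ hd'))
          (setAt g ay ax 2) (st ++ [(ay, ax)]) hS1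
      refine ⟨Mono_trans hm1 mds, sds, by simp at zds ⊢; omega, ?_, ?_, ?_, ?_⟩
      · intro x hx
        exact pds x (List.mem_append_left _ hx)
      · intro x hx
        rcases qds x hx with h | h
        · rcases List.mem_append.mp h with h' | h'
          · exact Or.inl h'
          · right
            have hxw : x = (ay, ax) := by simpa using h'
            subst hxw
            rw [valAt_eq_entry] at hval1 ⊢
            exact ⟨hwinb, Mono_two mds hval1, hrw⟩
        · exact Or.inr h
      · intro d' hd' hinb'
        rcases List.mem_cons.mp hd' with h' | h'
        · subst h'
          rw [valAt_eq_entry] at hval1 ⊢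
          have := Mono_two mds hval1
          rw [← hay, ← haxx]
          omega
        · exact nds d' h' hinb'
      · intro x hx h2
        rcases kds x hx h2 with h | h
        · rw [valAt_eq_entry] at h ⊢
          rcases entry_setAt_cases g ay ax 2 x.1.toNat x.2.toNat with h' | ⟨hi, hj, _⟩
          · exact Or.inl (h' ▸ h)
          · right
            apply pds
            apply List.mem_append_right
            have hxw : x = (ay, ax) := by
              obtain ⟨a, b⟩ := x
              obtain ⟨ha, _, hb, _⟩ := hx
              simp at hi hj ha hb ⊢
              constructor <;> omega
            simp [hxw]
        · exact Or.inr h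
    · have hstep : bStep n m c (g, st) d = (g, st) := by
        rw [bStep, if_neg hP]
      rw [hstep]
      obtain ⟨mds, sds, zds, pds, qds, nds, kds⟩ :=
        ihds (fun d' hd' => hds d' (List.mem_cons_of_mem _ hd')) g st hS
      refine ⟨mds, sds, zds, pds, qds, ?_, kds⟩
      intro d' hd' hinb'
      rcases List.mem_cons.mp hd' with h' | h'
      · subst h'
        have h0 : valAt g ay ax ≠ 0 := by
          intro hz
          exact hP ⟨hinb', hz⟩
        rw [valAt_eq_entry] at h0 ⊢
        rw [← hay, ← haxx]
        intro hz
        exact h0 (Mono_zero_back mds hz)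
      · exact nds d' h' hinb'

theorem B_flood {g0 : List (List Int)} {n m : Int} (hv : ValidIdx g0 n m) :
    ∀ (f : Nat) (stack : List (Int × Int)) (g : List (List Int)),
    stack.length + Zin n m g < f →
    Sound g0 n m g →
    (∀ c ∈ stack, inb n m c ∧ valAt g c.1 c.2 = 2 ∧ Reach g0 n m c) →
    (∀ c, inb n m c → valAt g c.1 c.2 = 2 → c ∈ stack ∨ NoZN n m g c) →
    Sound g0 n m (floodB f n m g stack) ∧ Sat n m (floodB f n m g stack) := by
  intro f
  induction f with
  | zero => intro stack g h; omega
  | succ f ihf =>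
    intro stack g hF hS hst hinv
    rw [floodB_succ]
    cases hL : stack.getLast? with
    | none =>
      have hnil : stack = [] := List.getLast?_eq_none_iff.mp hL
      subst hnil
      refine ⟨hS, ?_⟩
      intro c hc h2
      rcases hinv c hc h2 with h | h
      · cases h
      · exact h
    | some c =>
      obtain ⟨l', hl'⟩ := List.getLast?_eq_some_iff.mp hL
      have hdrop : stack.dropLast = l' := by rw [hl']; exact List.dropLast_concat ..
      obtain ⟨hcinb, hc2, hcre⟩ := hst c (by rw [hl']; exact List.mem_append_right _ List.mem_cons_self)
      obtain ⟨mds, sds, zds, pds, qds, nds, kds⟩ :=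
        B_fold hv hcinb hcre dirsA (fun _ h => h) g stack.dropLast hS
      set G := (dirsA.foldl (bStep n m c) (g, stack.dropLast)).1 with hG
      set ST := (dirsA.foldl (bStep n m c) (g, stack.dropLast)).2 with hST
      have hlen : stack.dropLast.length + 1 = stack.length := by
        rw [hl']; simp
      apply ihf ST G
      · omega
      · exact sds
      · intro x hx
        rcases qds x hx with h | h
        · obtain ⟨hxinb, hx2, hxre⟩ := hst x (by rw [hl', ← hdrop]; exact List.mem_append_left _ h)
          refine ⟨hxinb, ?_, hxre⟩
          rw [valAt_eq_entry] at hx2 ⊢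
          exact Mono_two mds hx2
        · exact h
      · intro x hx h2
        rcases kds x hx h2 with h | h
        · rcases hinv x hx h with h' | h'
          · rw [hl'] at h'
            rcases List.mem_append.mp h' with h'' | h''
            · exact Or.inl (pds x (hdrop ▸ h''))
            · have hxc : x = c := by simpa using h''
              subst hxc
              right
              intro e he hadj
              obtain ⟨dd, hdd, hde⟩ := exists_dir_of_adjc hadj
              rw [hde]
              exact nds dd hdd (hde ▸ he)
          · exact Or.inr (NoZN_mono mds h')
        · exact Or.inl h


theorem combos2_mem {α : Type} {l : List α} {t : α × α} (h : t ∈ combos2 l) :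
    t.1 ∈ l ∧ t.2 ∈ l := by
  induction l with
  | nil => cases h
  | cons a r ih =>
    rw [combos2] at h
    rcases List.mem_append.mp h with h' | h'
    · obtain ⟨b, hb, hb'⟩ := List.mem_map.mp h'
      subst hb'
      exact ⟨List.mem_cons_self, List.mem_cons_of_mem _ hb⟩
    · obtain ⟨h1, h2⟩ := ih h'
      exact ⟨List.mem_cons_of_mem _ h1, List.mem_cons_of_mem _ h2⟩

theorem combos3_mem {α : Type} {l : List α} {t : α × α × α} (h : t ∈ combos3 l) :
    t.1 ∈ l ∧ t.2.1 ∈ l ∧ t.2.2 ∈ l := by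
  induction l with
  | nil => cases h
  | cons a r ih =>
    rw [combos3] at h
    rcases List.mem_append.mp h with h' | h'
    · obtain ⟨p, hp, hp'⟩ := List.mem_map.mp h'
      obtain ⟨h1, h2⟩ := combos2_mem hp
      subst hp'
      exact ⟨List.mem_cons_self, List.mem_cons_of_mem _ h1, List.mem_cons_of_mem _ h2⟩
    · obtain ⟨h1, h2, h3⟩ := ih h'
      exact ⟨List.mem_cons_of_mem _ h1, List.mem_cons_of_mem _ h2, List.mem_cons_of_mem _ h3⟩

def scanList (arr : List (List Int)) (n m : Int) (v : Int) : List (Int × Int) :=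
  (PySem.List.pyRange 0 n 1).flatMap (fun y =>
    ((PySem.List.pyRange 0 m 1).filter (fun x => valAt arr y x = v)).map (fun x => (y, x)))

theorem scan_eq (arr : List (List Int)) (n m : Int) :
    (PySem.List.pyRange 0 n 1).foldl (fun (p : List (Int × Int) × List (Int × Int)) y =>
      (PySem.List.pyRange 0 m 1).foldl (fun p x =>
        let p1 := if valAt arr y x = 0 then (p.1 ++ [(y, x)], p.2) else p
        if valAt arr y x = 2 then (p1.1, p1.2 ++ [(y, x)]) else p1) p) ([], [])
    = (scanList arr n m 0, scanList arr n m 2) := by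
  have hstep : ∀ y : Int,
      (fun (p : List (Int × Int) × List (Int × Int)) (x : Int) =>
        let p1 := if valAt arr y x = 0 then (p.1 ++ [(y, x)], p.2) else p
        if valAt arr y x = 2 then (p1.1, p1.2 ++ [(y, x)]) else p1)
      = (fun (p : List (Int × Int) × List (Int × Int)) (x : Int) =>
        ((fun (l : List (Int × Int)) (x : Int) => if valAt arr y x = 0 then l ++ [(y, x)] else l) p.1 x,
         (fun (l : List (Int × Int)) (x : Int) => if valAt arr y x = 2 then l ++ [(y, x)] else l) p.2 x)) := by
    intro y
    funext p x
    dsimp only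
    split_ifs with h1 h2 <;> simp_all <;> omega
  have houter :
      (fun (p : List (Int × Int) × List (Int × Int)) (y : Int) =>
        (PySem.List.pyRange 0 m 1).foldl (fun p x =>
          let p1 := if valAt arr y x = 0 then (p.1 ++ [(y, x)], p.2) else p
          if valAt arr y x = 2 then (p1.1, p1.2 ++ [(y, x)]) else p1) p)
      = (fun (p : List (Int × Int) × List (Int × Int)) (y : Int) =>
        ((fun (l : List (Int × Int)) (y : Int) => l ++
            (((PySem.List.pyRange 0 m 1).filter (fun x => valAt arr y x = 0)).map (fun x => (y, x)))) p.1 y,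
         (fun (l : List (Int × Int)) (y : Int) => l ++
            (((PySem.List.pyRange 0 m 1).filter (fun x => valAt arr y x = 2)).map (fun x => (y, x)))) p.2 y)) := by
    funext p y
    rw [hstep y]
    obtain ⟨p1, p2⟩ := p
    rw [PySem.List.foldl_prod_mk
      (f := fun (l : List (Int × Int)) (x : Int) => if valAt arr y x = 0 then l ++ [(y, x)] else l)
      (g := fun (l : List (Int × Int)) (x : Int) => if valAt arr y x = 2 then l ++ [(y, x)] else l)]
    dsimp only
    rw [PySem.List.foldl_append_ite (fun x => valAt arr y x = 0) (fun x => ((y, x) : Int × Int)),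
        PySem.List.foldl_append_ite (fun x => valAt arr y x = 2) (fun x => ((y, x) : Int × Int))]
  rw [houter, PySem.List.foldl_prod_mk
      (f := fun (l : List (Int × Int)) (y : Int) => l ++
        (((PySem.List.pyRange 0 m 1).filter (fun x => valAt arr y x = 0)).map (fun x => (y, x))))
      (g := fun (l : List (Int × Int)) (y : Int) => l ++
        (((PySem.List.pyRange 0 m 1).filter (fun x => valAt arr y x = 2)).map (fun x => (y, x)))),
    PySem.List.foldl_append_eq_flatMap, PySem.List.foldl_append_eq_flatMap]
  rfl

theorem mem_scanList {arr : List (List Int)} {n m v : Int} {c : Int × Int} :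
    c ∈ scanList arr n m v ↔ inb n m c ∧ valAt arr c.1 c.2 = v := by
  obtain ⟨a, b⟩ := c
  constructor
  · intro h
    obtain ⟨y, hy, hx⟩ := List.mem_flatMap.mp h
    obtain ⟨x, hx2, hx3⟩ := List.mem_map.mp hx
    obtain ⟨hx4, hx5⟩ := List.mem_filter.mp hx2
    obtain ⟨hy1, hy2⟩ := PySem.List.mem_pyRange_one.mp hy
    obtain ⟨hx6, hx7⟩ := PySem.List.mem_pyRange_one.mp hx4
    obtain ⟨hya, hxb⟩ := Prod.mk.inj hx3
    subst hya; subst hxb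
    exact ⟨⟨hy1, hy2, hx6, hx7⟩, by simpa using hx5⟩
  · rintro ⟨⟨h1, h2, h3, h4⟩, hv⟩
    refine List.mem_flatMap.mpr ⟨a, PySem.List.mem_pyRange_one.mpr ⟨h1, h2⟩, ?_⟩
    exact List.mem_map.mpr ⟨b, List.mem_filter.mpr
      ⟨PySem.List.mem_pyRange_one.mpr ⟨h3, h4⟩, by simpa using hv⟩, rfl⟩

theorem Pre_ValidIdx {arr : List (List Int)} {n m : Int} (hpre : Pre_serachAll arr n m) :
    ValidIdx arr n m := by
  intro c hc
  obtain ⟨h1, h2, h3, h4⟩ := hc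
  have hn : 0 < n := by omega
  have hm : 0 < m := by omega
  obtain ⟨hlen, hrow⟩ := hpre hn hm
  have hc1 : c.1.toNat < arr.length := by omega
  refine ⟨hc1, ?_⟩
  have htk : c.1.toNat < (arr.take n.toNat).length := by
    rw [List.length_take]
    omega
  have hmem : arr.getD c.1.toNat [] ∈ arr.take n.toNat := by
    rw [List.getD_eq_getElem?_getD, List.getElem?_eq_getElem hc1]
    simp only [Option.getD_some]
    have he : (arr.take n.toNat)[c.1.toNat]'htk = arr[c.1.toNat]'hc1 := List.getElem_take
    rw [← he]
    exact List.getElem_mem htk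
  have := hrow _ hmem
  omega

theorem checkA_eq_sum (g : List (List Int)) :
    checkA g = (g.map (fun row => (PySem.List.count row 0 : Int))).sum := by
  unfold checkA
  have hstep : (fun (cnt : Int) (row : List Int) => row.foldl (fun c el => if el = 0 then c + 1 else c) cnt)
      = (fun (cnt : Int) (row : List Int) => cnt + (PySem.List.count row 0 : Int)) := by
    funext cnt row
    rw [PySem.List.foldl_ite_add_one (fun el => el = 0) row cnt, PySem.List.count_eq]
    norm_cast
  rw [hstep, PySem.List.foldl_add (g := fun (row : List Int) => (PySem.List.count row 0 : Int))]
  simp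


def wall (arr : List (List Int)) (e : (Int × Int) × (Int × Int) × (Int × Int)) : List (List Int) :=
  setAt (setAt (setAt arr e.1.1 e.1.2 1) e.2.1.1 e.2.1.2 1) e.2.2.1 e.2.2.2 1

theorem shape_wall (arr : List (List Int)) (e : (Int × Int) × (Int × Int) × (Int × Int)) :
    shapeOf (wall arr e) = shapeOf arr := by
  unfold wall
  rw [shape_setAt, shape_setAt, shape_setAt]

theorem entry_wall_cases (arr : List (List Int)) (e : (Int × Int) × (Int × Int) × (Int × Int)) (i j : Nat) :
    entry (wall arr e) i j = entry arr i j ∨ entry (wall arr e) i j = 1 := by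
  unfold wall
  rcases entry_setAt_cases (setAt (setAt arr e.1.1 e.1.2 1) e.2.1.1 e.2.1.2 1) e.2.2.1 e.2.2.2 1 i j with h3 | ⟨_, _, h3⟩
  · rcases entry_setAt_cases (setAt arr e.1.1 e.1.2 1) e.2.1.1 e.2.1.2 1 i j with h2 | ⟨_, _, h2⟩
    · rcases entry_setAt_cases arr e.1.1 e.1.2 1 i j with h1 | ⟨_, _, h1⟩
      · exact Or.inl (h3.trans (h2.trans h1))
      · exact Or.inr (h3.trans (h2.trans h1))
    · exact Or.inr (h3.trans h2)
  · exact Or.inr h3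

theorem entry_set_other {g : List (List Int)} {n m : Int} {w c : Int × Int} {v : Int}
    (hw : inb n m w) (hc : inb n m c) (hne : c ≠ w) :
    valAt (setAt g w.1 w.2 v) c.1 c.2 = valAt g c.1 c.2 := by
  rw [valAt_eq_entry, valAt_eq_entry]
  apply entry_setAt_ne
  by_contra hcon
  push_neg at hcon
  apply hne
  obtain ⟨a, b⟩ := c
  obtain ⟨wa, wb⟩ := w
  obtain ⟨h1, _, h3, _⟩ := hc
  obtain ⟨h5, _, h7, _⟩ := hw
  simp at hcon h1 h3 h5 h7 ⊢
  omega

theorem val_wall_two {arr : List (List Int)} {n m : Int} {e : (Int × Int) × (Int × Int) × (Int × Int)}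
    (hws : ∀ k ∈ [e.1, e.2.1, e.2.2], inb n m k ∧ valAt arr k.1 k.2 = 0)
    {c : Int × Int} (hc : inb n m c) (h2 : valAt arr c.1 c.2 = 2) :
    valAt (wall arr e) c.1 c.2 = 2 := by
  have hne : ∀ k ∈ [e.1, e.2.1, e.2.2], c ≠ k := by
    intro k hk hck
    have := (hws k hk).2
    rw [← hck] at this
    rw [this] at h2
    cases h2
  unfold wall
  rw [entry_set_other (hws e.2.2 (by simp)).1 hc (hne e.2.2 (by simp)),
      entry_set_other (hws e.2.1 (by simp)).1 hc (hne e.2.1 (by simp)),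
      entry_set_other (hws e.1 (by simp)).1 hc (hne e.1 (by simp))]
  exact h2

theorem val_wall_two_back {arr : List (List Int)} {e : (Int × Int) × (Int × Int) × (Int × Int)}
    {c : Int × Int} (h2 : valAt (wall arr e) c.1 c.2 = 2) : valAt arr c.1 c.2 = 2 := by
  rw [valAt_eq_entry] at h2 ⊢
  rcases entry_wall_cases arr e c.1.toNat c.2.toNat with h | h
  · rw [← h]; exact h2
  · rw [h] at h2; cases h2

theorem per_combo (arr : List (List Int)) (n m : Int) (hpre : Pre_serachAll arr n m)
    (e : (Int × Int) × (Int × Int) × (Int × Int))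
    (hws : ∀ k ∈ [e.1, e.2.1, e.2.2], inb n m k ∧ valAt arr k.1 k.2 = 0) :
    checkA ((scanList arr n m 2).foldl
        (fun g ve => virusGo (n.toNat * m.toNat + 1) g ve.1 ve.2 n m) (wall arr e))
    = ((floodB ((scanList arr n m 2).length + n.toNat * m.toNat + 1) n m (wall arr e)
          (scanList arr n m 2)).map (fun row => (PySem.List.count row 0 : Int))).sum := by
  have hv : ValidIdx (wall arr e) n m :=
    ValidIdx_of_shape (Pre_ValidIdx hpre) (shape_wall arr e)
  have hS0 : Sound (wall arr e) n m (wall arr e) := ⟨rfl, fun i j => Or.inl rfl⟩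
  have seeds : ∀ c ∈ scanList arr n m 2,
      inb n m c ∧ valAt (wall arr e) c.1 c.2 = 2 ∧ Reach (wall arr e) n m c := by
    intro c hcmem
    obtain ⟨hcinb, hc2⟩ := mem_scanList.mp hcmem
    have hw2 : valAt (wall arr e) c.1 c.2 = 2 := val_wall_two hws hcinb hc2
    exact ⟨hcinb, hw2, Reach.base c hcinb hw2⟩
  have hinv : ∀ c, inb n m c → valAt (wall arr e) c.1 c.2 = 2 →
      c ∈ scanList arr n m 2 ∨ NoZN n m (wall arr e) c := by
    intro c hcinb h2
    exact Or.inl (mem_scanList.mpr ⟨hcinb, val_wall_two_back h2⟩)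
  obtain ⟨SA, TA⟩ := A_flood hv (scanList arr n m 2) (wall arr e) hS0 seeds hinv
  obtain ⟨SB, TB⟩ := B_flood hv ((scanList arr n m 2).length + n.toNat * m.toNat + 1)
    (scanList arr n m 2) (wall arr e) (by have := Zin_le n m (wall arr e); omega) hS0 seeds hinv
  rw [checkA_eq_sum, grids_eq SA TA SB TB]

theorem main_core (arr : List (List Int)) (n m : Int) (hpre : Pre_serachAll arr n m) :
    serachAll arr n m = serachAll_alt arr n m := by
  rw [serachAll, serachAll_alt]
  simp only [scan_eq arr n m, List.map_id']
  apply PySem.List.foldl_congr_mem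
  intro acc e he
  obtain ⟨h1, h2, h3⟩ := combos3_mem he
  have hws : ∀ k ∈ [e.1, e.2.1, e.2.2], inb n m k ∧ valAt arr k.1 k.2 = 0 := by
    intro k hk
    simp only [List.mem_cons, List.not_mem_nil, or_false] at hk
    rcases hk with hk | hk | hk
    · exact hk ▸ mem_scanList.mp h1
    · exact hk ▸ mem_scanList.mp h2
    · exact hk ▸ mem_scanList.mp h3
  exact congrArg (fun t => max acc t) (per_combo arr n m hpre e hws)

theorem serachAll_spec : Claim_equal_serachAll := by
  intro arr n m _ hpre
  unfold Spec_serachAll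
  exact main_core arr n m hpre
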